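-- pv_equiv track=rewrite | github.com/iamplus-trimabk/figma-to-code | design_system_converter/token_converter.py | _categorize_semantic_colors
-- ===== SOURCE A (Python) =====
-- from typing import Dict, List, Any, Tuple, Optional, Union
--
-- def _categorize_semantic_colors(all_colors: Dict[str, str]) -> Dict[str, str]:
--     """Categorize semantic colors (primary, secondary, success, error, etc.)."""
--     semantic = {}
--
--     # Common semantic color patterns
--     semantic_patterns = {
--         'primary': ['primary', 'main', 'brand', 'accent'],
--         'secondary': ['secondary', 'subtle', 'muted'],
--         'success': ['success', 'valid', 'positive', 'green'],
--         'warning': ['warning', 'caution', 'yellow'],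
--         'error': ['error', 'danger', 'invalid', 'red'],
--         'info': ['info', 'information', 'blue']
--     }
--
--     for semantic_name, patterns in semantic_patterns.items():
--         for color_name, color_value in all_colors.items():
--             if any(pattern in color_name.lower() for pattern in patterns):
--                 semantic[semantic_name] = color_value
--                 break
--
--     return semantic
-- ===== SOURCE B (Python) =====
-- def _categorize_semantic_colors(all_colors):
--     """Categorize semantic colors: one pass over the colors, filling unfilled categories."""
--     semantic_patterns = {
--         'primary': ['primary', 'main', 'brand', 'accent'],
--         'secondary': ['secondary', 'subtle', 'muted'],
--         'success': ['success', 'valid', 'positive', 'green'],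
--         'warning': ['warning', 'caution', 'yellow'],
--         'error': ['error', 'danger', 'invalid', 'red'],
--         'info': ['info', 'information', 'blue']
--     }
--     found = {}
--     for color_name, color_value in all_colors.items():
--         lname = color_name.lower()
--         for category, patterns in semantic_patterns.items():
--             if category not in found and any(p in lname for p in patterns):
--                 found[category] = color_value
--     return {c: found[c] for c in semantic_patterns if c in found}
-- ===== Notes on version B (the rewrite author's own statement) =====
-- stated objective: alternative
-- what changed: A rescans the whole color dict once per semantic category (with break); B makes a single forward pass over the colors, assigning each still-unfilled category on its first match, then emits the result in canonical category order.
import Mathlib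
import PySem

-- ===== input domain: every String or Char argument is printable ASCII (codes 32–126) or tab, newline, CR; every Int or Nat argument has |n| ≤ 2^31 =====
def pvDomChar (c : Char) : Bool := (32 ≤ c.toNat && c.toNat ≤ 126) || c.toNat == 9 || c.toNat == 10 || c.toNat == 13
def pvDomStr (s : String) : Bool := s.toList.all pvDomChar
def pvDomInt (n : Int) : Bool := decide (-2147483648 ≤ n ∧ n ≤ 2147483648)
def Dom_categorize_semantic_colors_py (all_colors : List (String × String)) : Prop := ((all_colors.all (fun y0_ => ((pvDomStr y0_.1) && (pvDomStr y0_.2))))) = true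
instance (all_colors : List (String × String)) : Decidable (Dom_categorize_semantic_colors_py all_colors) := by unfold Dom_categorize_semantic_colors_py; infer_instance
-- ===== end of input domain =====

-- B replaces A's per-category rescan of the color dict by one forward pass over the colors
-- that fills each still-unfilled category at its first match (alternative decomposition, same cost).


-- shared literal table and the pattern test (identical in both Pythons)
def semanticPatterns : List (String × List String) :=
  [("primary", ["primary", "main", "brand", "accent"]),
   ("secondary", ["secondary", "subtle", "muted"]),
   ("success", ["success", "valid", "positive", "green"]),
   ("warning", ["warning", "caution", "yellow"]),
   ("error", ["error", "danger", "invalid", "red"]),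
   ("info", ["info", "information", "blue"])]

def matchesAny (patterns : List String) (name : String) : Bool :=
  patterns.any (fun p => PySem.Str.isIn p (PySem.Str.lower name))

-- ===== PORT A =====
-- A's inner loop: scan the colors, assign semantic[semName] at the first match and break
def aInner (semName : String) (patterns : List String)
    (semantic : PySem.Dict String String) :
    List (String × String) → PySem.Dict String String
  | [] => semantic
  | (n, v) :: rest =>
      if matchesAny patterns n then semantic.insert semName v
      else aInner semName patterns semantic rest

def categorize_semantic_colors_py (all_colors : List (String × String)) : List (String × String) :=
  let colors := (PySem.Dict.ofList all_colors).items   -- the parameter is a Python dict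
  (semanticPatterns.foldl (fun semantic x => aInner x.1 x.2 semantic colors)
    PySem.Dict.empty).items

-- ===== PORT B =====
-- B's per-color step: fill every still-unfilled category the color's name matches
def bStepG (cats : List (String × List String)) (found : PySem.Dict String String)
    (c : String × String) : PySem.Dict String String :=
  cats.foldl (fun found x =>
    if !found.contains x.1 && matchesAny x.2 c.1 then found.insert x.1 c.2 else found) found

def categorize_semantic_colors_py_alt (all_colors : List (String × String)) : List (String × String) :=
  let colors := (PySem.Dict.ofList all_colors).items   -- the parameter is a Python dict
  let found := colors.foldl (bStepG semanticPatterns) PySem.Dict.empty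
  semanticPatterns.filterMap (fun x => (found.get? x.1).map (fun v => (x.1, v)))

-- ===== PRECONDITION & SPEC =====
def Spec_categorize_semantic_colors_py (all_colors : List (String × String)) (out : List (String × String)) : Prop := out = categorize_semantic_colors_py_alt all_colors
instance (all_colors : List (String × String)) (out : List (String × String)) : Decidable (Spec_categorize_semantic_colors_py all_colors out) := by unfold Spec_categorize_semantic_colors_py; infer_instance

-- ===== CLAIM (what is proved, stated in full; the proofs are below) =====
def Claim_equal_categorize_semantic_colors_py : Prop := ∀ (all_colors : List (String × String)), Dom_categorize_semantic_colors_py all_colors → Spec_categorize_semantic_colors_py all_colors (categorize_semantic_colors_py all_colors)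

-- ===== LEMMAS AND PROOFS =====

-- the first color value whose name matches one of the patterns
def firstMatch (patterns : List String) : List (String × String) → Option String
  | [] => none
  | (n, v) :: rest => if matchesAny patterns n then some v else firstMatch patterns rest

lemma aInner_eq (semName : String) (ps : List String) (sem : PySem.Dict String String)
    (colors : List (String × String)) :
    aInner semName ps sem colors =
      match firstMatch ps colors with
      | some v => sem.insert semName v
      | none => sem := by
  induction colors with
  | nil => rfl
  | cons c rest ih =>
      obtain ⟨n, v⟩ := c
      by_cases h : matchesAny ps n = true
      · simp [aInner, firstMatch, h]
      · simp [aInner, firstMatch, h, ih]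

lemma items_foldl_aInner (colors : List (String × String)) :
    ∀ (cats : List (String × List String)) (sem : PySem.Dict String String),
    (cats.map (·.1)).Nodup →
    (∀ x ∈ cats, sem.contains x.1 = false) →
    (cats.foldl (fun sem x => aInner x.1 x.2 sem colors) sem).items =
      sem.items ++ cats.filterMap (fun x => (firstMatch x.2 colors).map (fun v => (x.1, v))) := by
  intro cats
  induction cats with
  | nil => intro sem _ _; simp
  | cons x rest ih =>
      intro sem hnd hfree
      simp only [List.map_cons, List.nodup_cons] at hnd
      have hx : sem.contains x.1 = false := hfree x (List.mem_cons_self ..)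
      simp only [List.foldl_cons, List.filterMap_cons]
      rw [aInner_eq]
      cases hfm : firstMatch x.2 colors with
      | none =>
          rw [ih sem hnd.2 (fun y hy => hfree y (List.mem_cons_of_mem _ hy))]
          simp
      | some v =>
          rw [ih (sem.insert x.1 v) hnd.2 ?_]
          · rw [PySem.Dict.items_insert_of_not_contains _ _ hx]
            simp
          · intro y hy
            rw [PySem.Dict.contains_insert]
            have hne : y.1 ≠ x.1 := by
              intro he
              exact hnd.1 (he ▸ List.mem_map_of_mem hy)
            simp [hne, hfree y (List.mem_cons_of_mem _ hy)]

lemma bStepG_get?_not_mem (cats : List (String × List String)) (c : String × String)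
    (sn : String) (h : sn ∉ cats.map (·.1)) :
    ∀ found : PySem.Dict String String, (bStepG cats found c).get? sn = found.get? sn := by
  induction cats with
  | nil => intro found; rfl
  | cons x rest ih =>
      intro found
      simp only [List.map_cons, List.mem_cons, not_or] at h
      simp only [bStepG, List.foldl_cons]
      rw [show (List.foldl _ _ rest) = bStepG rest (if !found.contains x.1 && matchesAny x.2 c.1 then found.insert x.1 c.2 else found) c from rfl,
        ih h.2]
      split
      · exact PySem.Dict.get?_insert_of_ne _ _ h.1
      · rfl

lemma bStepG_get?_mem (cats : List (String × List String)) (c : String × String)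
    (sn : String) (ps : List String) (hmem : (sn, ps) ∈ cats)
    (hnd : (cats.map (·.1)).Nodup) :
    ∀ found : PySem.Dict String String,
    (bStepG cats found c).get? sn =
      match found.get? sn with
      | some v => some v
      | none => if matchesAny ps c.1 then some c.2 else found.get? sn := by
  induction cats with
  | nil => exact absurd hmem (List.not_mem_nil)
  | cons x rest ih =>
      intro found
      simp only [List.map_cons, List.nodup_cons] at hnd
      simp only [bStepG, List.foldl_cons]
      rw [show (List.foldl _ _ rest) = bStepG rest (if !found.contains x.1 && matchesAny x.2 c.1 then found.insert x.1 c.2 else found) c from rfl]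
      rcases List.mem_cons.mp hmem with he | hrest
      · -- x is (sn, ps); sn does not occur again in rest
        have hsn : sn ∉ rest.map (·.1) := by
          intro hm; exact hnd.1 (by rw [← he]; exact hm)
        rw [bStepG_get?_not_mem rest c sn hsn]
        have hc := PySem.Dict.contains_eq_isSome_get? found sn
        cases hg : found.get? sn with
        | some v =>
            have : found.contains sn = true := by rw [hc, hg]; rfl
            simp [← he, this, hg]
        | none =>
            have hcf : found.contains sn = false := by rw [hc, hg]; rfl
            by_cases hm : matchesAny ps c.1 = true
            · simp [← he, hcf, hm, PySem.Dict.get?_insert_self]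
            · simp [← he, hcf, hm, hg]
      · -- x.1 ≠ sn, step leaves sn's lookup alone, apply ih
        have hne : sn ≠ x.1 := by
          intro he'
          exact hnd.1 (he' ▸ List.mem_map_of_mem hrest)
        have hstep : ∀ d : PySem.Dict String String,
            ((if !found.contains x.1 && matchesAny x.2 c.1 then found.insert x.1 c.2 else found)).get? sn = found.get? sn := by
          intro _
          split
          · exact PySem.Dict.get?_insert_of_ne _ _ hne
          · rfl
        rw [ih hrest hnd.2, hstep found]

lemma foldl_bStep_get? (sn : String) (ps : List String) (hmem : (sn, ps) ∈ semanticPatterns) :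
    ∀ (colors : List (String × String)) (found : PySem.Dict String String),
    (colors.foldl (bStepG semanticPatterns) found).get? sn =
      match found.get? sn with
      | some v => some v
      | none => firstMatch ps colors := by
  intro colors
  induction colors with
  | nil =>
      intro found
      simp only [List.foldl_nil]
      cases hg : found.get? sn
      · simp only [hg, firstMatch]
      · simp only [hg]
  | cons c rest ih =>
      intro found
      simp only [List.foldl_cons]
      rw [ih]
      rw [bStepG_get?_mem semanticPatterns c sn ps hmem (by decide)]
      cases hg : found.get? sn with
      | some v => rfl
      | none =>
          by_cases hm : matchesAny ps c.1 = true
          · simp [firstMatch, hm]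
          · simp [firstMatch, hm]

-- ===== VERDICT (by name: the statement is the Claim_ definition above) =====
theorem categorize_semantic_colors_py_spec : Claim_equal_categorize_semantic_colors_py := by
  intro all_colors _
  unfold Spec_categorize_semantic_colors_py
  unfold categorize_semantic_colors_py categorize_semantic_colors_py_alt
  set colors := (PySem.Dict.ofList all_colors).items with hcolors
  rw [items_foldl_aInner colors semanticPatterns PySem.Dict.empty (by decide)
    (fun x _ => rfl)]
  rw [show (PySem.Dict.empty : PySem.Dict String String).items = [] from rfl, List.nil_append]
  apply List.filterMap_congr
  intro x hx
  rw [foldl_bStep_get? x.1 x.2 (by rwa [show (x.1, x.2) = x from rfl]) colors PySem.Dict.empty]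
  simp [PySem.Dict.get?_empty]
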